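-- pv_equiv track=rewrite | github.com/antigenomics/mirpy | mir/basic/aliases.py | airr_aliases_for_locus
-- ===== SOURCE A (Python) =====
-- AIRR_LOCUS_ALIASES: dict[str, set[str]] = {
--     "alpha": {"alpha", "tra"},
--     "beta": {"beta", "trb"},
--     "gamma": {"gamma", "trg"},
--     "delta": {"delta", "trd"},
--     "heavy": {"heavy", "igh"},
--     "kappa": {"kappa", "igk"},
--     "lambda": {"lambda", "igl"},
-- }
--
-- def airr_aliases_for_locus(locus: str) -> set[str]:
--     locus_norm = (locus or "").strip().lower()
--     if locus_norm in AIRR_LOCUS_ALIASES: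
--         return AIRR_LOCUS_ALIASES[locus_norm]
--     for aliases in AIRR_LOCUS_ALIASES.values():
--         if locus_norm in aliases:
--             return aliases
--     return {locus_norm}
-- ===== SOURCE B (Python) =====
-- AIRR_LOCUS_ALIASES: dict[str, set[str]] = {
--     "alpha": {"alpha", "tra"},
--     "beta": {"beta", "trb"},
--     "gamma": {"gamma", "trg"},
--     "delta": {"delta", "trd"},
--     "heavy": {"heavy", "igh"},
--     "kappa": {"kappa", "igk"},
--     "lambda": {"lambda", "igl"},
-- }
--
-- # Reverse index built once: every alias token (keys included, since each key is a
-- # member of its own set) maps directly to its alias set.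
-- _REVERSE_INDEX: dict[str, set[str]] = {
--     tok: aliases for aliases in AIRR_LOCUS_ALIASES.values() for tok in aliases
-- }
--
-- def airr_aliases_for_locus(locus: str) -> set[str]:
--     locus_norm = (locus or "").strip().lower()
--     return _REVERSE_INDEX.get(locus_norm, {locus_norm})
-- ===== Notes on version B (the rewrite author's own statement) =====
-- stated objective: idiomatic
-- what changed: B inverts the alias table once into a token->set reverse index, so the per-call key check plus linear scan over all value-sets collapses into a single dict .get with a fresh-singleton default.
import Mathlib
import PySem

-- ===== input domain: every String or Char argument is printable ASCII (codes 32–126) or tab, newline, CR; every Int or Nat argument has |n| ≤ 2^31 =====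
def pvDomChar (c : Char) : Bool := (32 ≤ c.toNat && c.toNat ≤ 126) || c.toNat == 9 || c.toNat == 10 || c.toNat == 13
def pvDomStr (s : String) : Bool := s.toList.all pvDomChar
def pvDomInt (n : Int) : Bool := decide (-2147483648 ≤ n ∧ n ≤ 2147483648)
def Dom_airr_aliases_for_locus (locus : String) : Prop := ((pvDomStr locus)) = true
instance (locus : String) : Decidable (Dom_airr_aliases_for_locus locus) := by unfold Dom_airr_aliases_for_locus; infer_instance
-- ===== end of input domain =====

-- B replaces A's key check + scan over all alias sets by a single lookup in a reverse index built once (idiomatic; same return value).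

-- ===== PORT A =====
-- AIRR_LOCUS_ALIASES: dict[str, set[str]] (insertion order); each value is a PySem.Set String
def airrLocusAliases : PySem.Dict String (PySem.Set String) :=
  PySem.Dict.mk
    [("alpha",  PySem.Set.ofList ["alpha", "tra"]),
     ("beta",   PySem.Set.ofList ["beta", "trb"]),
     ("gamma",  PySem.Set.ofList ["gamma", "trg"]),
     ("delta",  PySem.Set.ofList ["delta", "trd"]),
     ("heavy",  PySem.Set.ofList ["heavy", "igh"]),
     ("kappa",  PySem.Set.ofList ["kappa", "igk"]),
     ("lambda", PySem.Set.ofList ["lambda", "igl"])]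

-- the if/for-scan/fallback part of A's body, on the normalized string
def airrLookup (locus_norm : String) : List String :=
  -- if locus_norm in AIRR_LOCUS_ALIASES: return AIRR_LOCUS_ALIASES[locus_norm]
  match PySem.Dict.get? airrLocusAliases locus_norm with
  | some aliases => aliases
  | none =>
    -- for aliases in AIRR_LOCUS_ALIASES.values(): if locus_norm in aliases: return aliases
    match (PySem.Dict.values airrLocusAliases).find?
            (fun aliases => PySem.Set.contains aliases locus_norm) with
    | some aliases => aliases
    | none => PySem.Set.ofList [locus_norm]   -- return {locus_norm}

def airr_aliases_for_locus (locus : String) : List String :=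
  -- locus_norm = (locus or "").strip().lower()
  airrLookup (PySem.Str.lower (PySem.Str.strip (if locus == "" then "" else locus)))

-- ===== PORT B =====
-- B reads the same module-level AIRR_LOCUS_ALIASES constant as A
-- _REVERSE_INDEX = {tok: aliases for aliases in AIRR_LOCUS_ALIASES.values() for tok in aliases}
def reverseIndex : PySem.Dict String (PySem.Set String) :=
  (PySem.Dict.values airrLocusAliases).foldl
    (fun d aliases => aliases.foldl (fun d tok => PySem.Dict.insert d tok aliases) d)
    PySem.Dict.empty

-- return _REVERSE_INDEX.get(locus_norm, {locus_norm})
def altLookup (locus_norm : String) : List String :=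
  (PySem.Dict.get? reverseIndex locus_norm).getD (PySem.Set.ofList [locus_norm])

def airr_aliases_for_locus_alt (locus : String) : List String :=
  altLookup (PySem.Str.lower (PySem.Str.strip (if locus == "" then "" else locus)))

-- ===== PRECONDITION & SPEC =====
def Spec_airr_aliases_for_locus (locus : String) (out : List String) : Prop := out = airr_aliases_for_locus_alt locus
instance (locus : String) (out : List String) : Decidable (Spec_airr_aliases_for_locus locus out) := by unfold Spec_airr_aliases_for_locus; infer_instance

-- ===== CLAIM (what is proved, stated in full; the proofs are below) =====
def Claim_equal_airr_aliases_for_locus : Prop := ∀ (locus : String), Dom_airr_aliases_for_locus locus → Spec_airr_aliases_for_locus locus (airr_aliases_for_locus locus)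

-- ===== LEMMAS AND PROOFS =====

-- the two lookup strategies agree for every normalized string
theorem lookup_agrees (n : String) : airrLookup n = altLookup n := by
  unfold airrLookup altLookup
  have hrev : reverseIndex = PySem.Dict.mk
      [("alpha", ["alpha", "tra"]), ("tra", ["alpha", "tra"]),
       ("beta", ["beta", "trb"]), ("trb", ["beta", "trb"]),
       ("gamma", ["gamma", "trg"]), ("trg", ["gamma", "trg"]),
       ("delta", ["delta", "trd"]), ("trd", ["delta", "trd"]),
       ("heavy", ["heavy", "igh"]), ("igh", ["heavy", "igh"]),
       ("kappa", ["kappa", "igk"]), ("igk", ["kappa", "igk"]),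
       ("lambda", ["lambda", "igl"]), ("igl", ["lambda", "igl"])] := by decide
  rw [hrev]
  by_cases h : n ∈ (["alpha","tra","beta","trb","gamma","trg","delta","trd",
                     "heavy","igh","kappa","igk","lambda","igl"] : List String)
  · fin_cases h <;> decide
  · simp only [List.mem_cons, List.not_mem_nil, or_false] at h
    push Not at h
    obtain ⟨h1,h2,h3,h4,h5,h6,h7,h8,h9,h10,h11,h12,h13,h14⟩ := h
    have k0 : ("alpha" == n) = false := beq_eq_false_iff_ne.mpr (Ne.symm h1)
    have m0 : (n == "alpha") = false := beq_eq_false_iff_ne.mpr h1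
    have k1 : ("tra" == n) = false := beq_eq_false_iff_ne.mpr (Ne.symm h2)
    have m1 : (n == "tra") = false := beq_eq_false_iff_ne.mpr h2
    have k2 : ("beta" == n) = false := beq_eq_false_iff_ne.mpr (Ne.symm h3)
    have m2 : (n == "beta") = false := beq_eq_false_iff_ne.mpr h3
    have k3 : ("trb" == n) = false := beq_eq_false_iff_ne.mpr (Ne.symm h4)
    have m3 : (n == "trb") = false := beq_eq_false_iff_ne.mpr h4
    have k4 : ("gamma" == n) = false := beq_eq_false_iff_ne.mpr (Ne.symm h5)
    have m4 : (n == "gamma") = false := beq_eq_false_iff_ne.mpr h5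
    have k5 : ("trg" == n) = false := beq_eq_false_iff_ne.mpr (Ne.symm h6)
    have m5 : (n == "trg") = false := beq_eq_false_iff_ne.mpr h6
    have k6 : ("delta" == n) = false := beq_eq_false_iff_ne.mpr (Ne.symm h7)
    have m6 : (n == "delta") = false := beq_eq_false_iff_ne.mpr h7
    have k7 : ("trd" == n) = false := beq_eq_false_iff_ne.mpr (Ne.symm h8)
    have m7 : (n == "trd") = false := beq_eq_false_iff_ne.mpr h8
    have k8 : ("heavy" == n) = false := beq_eq_false_iff_ne.mpr (Ne.symm h9)
    have m8 : (n == "heavy") = false := beq_eq_false_iff_ne.mpr h9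
    have k9 : ("igh" == n) = false := beq_eq_false_iff_ne.mpr (Ne.symm h10)
    have m9 : (n == "igh") = false := beq_eq_false_iff_ne.mpr h10
    have k10 : ("kappa" == n) = false := beq_eq_false_iff_ne.mpr (Ne.symm h11)
    have m10 : (n == "kappa") = false := beq_eq_false_iff_ne.mpr h11
    have k11 : ("igk" == n) = false := beq_eq_false_iff_ne.mpr (Ne.symm h12)
    have m11 : (n == "igk") = false := beq_eq_false_iff_ne.mpr h12
    have k12 : ("lambda" == n) = false := beq_eq_false_iff_ne.mpr (Ne.symm h13)
    have m12 : (n == "lambda") = false := beq_eq_false_iff_ne.mpr h13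
    have k13 : ("igl" == n) = false := beq_eq_false_iff_ne.mpr (Ne.symm h14)
    have m13 : (n == "igl") = false := beq_eq_false_iff_ne.mpr h14
    have s0 : ((PySem.Set.empty.add "alpha").add "tra" : List String) = ["alpha","tra"] := by decide
    have s1 : ((PySem.Set.empty.add "beta").add "trb" : List String) = ["beta","trb"] := by decide
    have s2 : ((PySem.Set.empty.add "gamma").add "trg" : List String) = ["gamma","trg"] := by decide
    have s3 : ((PySem.Set.empty.add "delta").add "trd" : List String) = ["delta","trd"] := by decide
    have s4 : ((PySem.Set.empty.add "heavy").add "igh" : List String) = ["heavy","igh"] := by decide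
    have s5 : ((PySem.Set.empty.add "kappa").add "igk" : List String) = ["kappa","igk"] := by decide
    have s6 : ((PySem.Set.empty.add "lambda").add "igl" : List String) = ["lambda","igl"] := by decide
    simp only [airrLocusAliases, PySem.Dict.get?, PySem.Dict.values_mk, List.find?,
      PySem.Set.contains, PySem.Set.ofList, List.foldl, s0, s1, s2, s3, s4, s5, s6,
      k0, k1, k2, k3, k4, k5, k6, k7, k8, k9, k10, k11, k12, k13,
      m0, m1, m2, m3, m4, m5, m6, m7, m8, m9, m10, m11, m12, m13,
      Bool.false_or, Bool.or_false, Option.map_none, Option.getD_none]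
    simp [List.contains_eq_mem, h1, h2, h3, h4, h5, h6, h7, h8, h9, h10,
      h11, h12, h13, h14]

theorem airr_spec_aux (locus : String) :
    airr_aliases_for_locus locus = airr_aliases_for_locus_alt locus := by
  unfold airr_aliases_for_locus airr_aliases_for_locus_alt
  exact lookup_agrees _

-- ===== VERDICT (by name: the statement is the Claim_ definition above) =====
theorem airr_aliases_for_locus_spec : Claim_equal_airr_aliases_for_locus := by
  intro locus _
  exact airr_spec_aux locus
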